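-- pv_equiv track=rewrite | github.com/HaritzPuerto/HSGN | src/data/deprecated/bottom_up_fully_hiearchical_w_query.py | compute_ent_relations
-- ===== SOURCE A (Python) =====
-- def compute_ent_relations(list_srl2srl, list_srl2ent, list_srl_rel_metadata):
--     # aux data structure
--     dict_srl2ent = dict()
--     for (srl, e) in list_srl2ent:
--         if srl in dict_srl2ent:
--             dict_srl2ent[srl].append(e)
--         else:
--             dict_srl2ent[srl] = [e]
--     # algorithm starts here
--     # for each srl rel, look for their children and inherit that relation
--     list_ent_rel = []
--     list_ent_rel_metadata = []
--     for i, (srl1, srl2) in enumerate(list_srl2srl):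
--         if srl1 not in dict_srl2ent:
--             continue
--         if srl2 not in dict_srl2ent:
--             continue
--         list_e1 = dict_srl2ent[srl1]
--         list_e2 = dict_srl2ent[srl2]
--         for e1 in list_e1:
--             for e2 in list_e2:
--                 list_ent_rel.append((e1,e2))
--                 list_ent_rel_metadata.append(list_srl_rel_metadata[i])
--     return list_ent_rel, list_ent_rel_metadata
-- ===== SOURCE B (Python) =====
-- def compute_ent_relations(list_srl2srl, list_srl2ent, list_srl_rel_metadata):
--     # No dict preprocessing: for each SRL relation, recompute the two entity
--     # lists by a direct scan, emit the cross product flat, and replicate the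
--     # metadata string once per emitted pair.
--     list_ent_rel = []
--     list_ent_rel_metadata = []
--     for i, (srl1, srl2) in enumerate(list_srl2srl):
--         es1 = [e for (s, e) in list_srl2ent if s == srl1]
--         es2 = [e for (s, e) in list_srl2ent if s == srl2]
--         n = len(es1) * len(es2)
--         if n:
--             list_ent_rel += [(e1, e2) for e1 in es1 for e2 in es2]
--             list_ent_rel_metadata += [list_srl_rel_metadata[i]] * n
--     return list_ent_rel, list_ent_rel_metadata
-- ===== Notes on version B (the rewrite author's own statement) =====
-- stated objective: simpler
-- what changed: Drops A's dict-of-entity-lists preprocessing and its three nested append loops: B rescans list_srl2ent per relation to build the two entity lists, emits the cross product as one flat comprehension and replicates the metadata string len(es1)*len(es2) times.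
import Mathlib
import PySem

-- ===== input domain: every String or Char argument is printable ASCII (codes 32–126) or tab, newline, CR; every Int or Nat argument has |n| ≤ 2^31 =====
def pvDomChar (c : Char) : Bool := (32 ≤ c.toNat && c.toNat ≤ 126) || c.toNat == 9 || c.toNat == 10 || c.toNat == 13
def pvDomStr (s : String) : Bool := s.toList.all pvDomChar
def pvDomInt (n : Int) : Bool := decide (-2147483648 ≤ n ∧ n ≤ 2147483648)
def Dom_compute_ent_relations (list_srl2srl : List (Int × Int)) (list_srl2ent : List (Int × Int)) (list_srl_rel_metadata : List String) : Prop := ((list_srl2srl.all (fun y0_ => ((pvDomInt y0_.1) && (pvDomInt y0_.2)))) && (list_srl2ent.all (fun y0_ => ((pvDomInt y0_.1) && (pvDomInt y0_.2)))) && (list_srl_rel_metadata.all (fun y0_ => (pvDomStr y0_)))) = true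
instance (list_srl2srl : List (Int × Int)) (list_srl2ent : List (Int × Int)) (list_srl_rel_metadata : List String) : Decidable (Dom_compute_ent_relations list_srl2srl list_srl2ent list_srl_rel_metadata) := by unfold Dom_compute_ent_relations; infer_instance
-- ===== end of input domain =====

-- B replaces A's dict-of-entity-lists preprocessing by a per-relation scan of
-- list_srl2ent, a flat cross-product comprehension and metadata replication
-- (objective: simpler).

-- ===== PORT A =====
def compute_ent_relations (list_srl2srl : List (Int × Int)) (list_srl2ent : List (Int × Int)) (list_srl_rel_metadata : List String) : (List (Int × Int)) × List String :=
  -- aux data structure: dict_srl2ent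
  let dict_srl2ent : PySem.Dict Int (List Int) :=
    list_srl2ent.foldl (fun d p =>
      if d.contains p.1 then d.modify p.1 [] (fun l => l ++ [p.2])  -- dict_srl2ent[srl].append(e)
      else d.insert p.1 [p.2]) PySem.Dict.empty
  -- main loop over enumerate(list_srl2srl)
  (PySem.List.enumerate list_srl2srl 0).foldl (fun acc ip =>
    let i := ip.1
    let srl1 := ip.2.1
    let srl2 := ip.2.2
    match dict_srl2ent.get? srl1 with
    | none => acc  -- continue
    | some list_e1 =>
      match dict_srl2ent.get? srl2 with
      | none => acc  -- continue
      | some list_e2 =>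
        list_e1.foldl (fun acc e1 =>
          list_e2.foldl (fun acc e2 =>
            (acc.1 ++ [(e1, e2)],
             acc.2 ++ [(PySem.List.pyGet? list_srl_rel_metadata i).getD ""]))  -- list_srl_rel_metadata[i]; none (IndexError) excluded by Pre_
            acc) acc) ([], [])

-- ===== PORT B =====
def compute_ent_relations_alt (list_srl2srl : List (Int × Int)) (list_srl2ent : List (Int × Int)) (list_srl_rel_metadata : List String) : (List (Int × Int)) × List String :=
  (PySem.List.enumerate list_srl2srl 0).foldl (fun acc ip =>
    let i := ip.1
    let srl1 := ip.2.1
    let srl2 := ip.2.2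
    let es1 := (list_srl2ent.filter (fun p => p.1 == srl1)).map (·.2)
    let es2 := (list_srl2ent.filter (fun p => p.1 == srl2)).map (·.2)
    let n := es1.length * es2.length
    if n ≠ 0 then
      (acc.1 ++ es1.flatMap (fun e1 => es2.map (fun e2 => (e1, e2))),
       acc.2 ++ List.replicate n ((PySem.List.pyGet? list_srl_rel_metadata i).getD ""))
    else acc) ([], [])

-- ===== PRECONDITION & SPEC =====
-- Pre_ excludes exactly the inputs on which Python A raises IndexError: a relation
-- index i beyond the metadata list whose both srl ids occur among the entity-link keys.
def Pre_compute_ent_relations (list_srl2srl : List (Int × Int)) (list_srl2ent : List (Int × Int)) (list_srl_rel_metadata : List String) : Prop :=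
  ∀ i : Nat, (h : i < list_srl2srl.length) → list_srl_rel_metadata.length ≤ i →
    ¬((list_srl2srl[i].1 ∈ list_srl2ent.map Prod.fst) ∧ (list_srl2srl[i].2 ∈ list_srl2ent.map Prod.fst))
instance (list_srl2srl : List (Int × Int)) (list_srl2ent : List (Int × Int)) (list_srl_rel_metadata : List String) : Decidable (Pre_compute_ent_relations list_srl2srl list_srl2ent list_srl_rel_metadata) := by unfold Pre_compute_ent_relations; infer_instance
def pvWitness_compute_ent_relations : (List (Int × Int)) × (List (Int × Int)) × List String := ([(1, 2)], [(1, 5), (2, 6)], ["m"])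

def Spec_compute_ent_relations (list_srl2srl : List (Int × Int)) (list_srl2ent : List (Int × Int)) (list_srl_rel_metadata : List String) (out : (List (Int × Int)) × List String) : Prop := out = compute_ent_relations_alt list_srl2srl list_srl2ent list_srl_rel_metadata
instance (list_srl2srl : List (Int × Int)) (list_srl2ent : List (Int × Int)) (list_srl_rel_metadata : List String) (out : (List (Int × Int)) × List String) : Decidable (Spec_compute_ent_relations list_srl2srl list_srl2ent list_srl_rel_metadata out) := by unfold Spec_compute_ent_relations; infer_instance

-- ===== CLAIM (what is proved, stated in full; the proofs are below) =====
def Claim_equal_compute_ent_relations : Prop := ∀ (list_srl2srl : List (Int × Int)) (list_srl2ent : List (Int × Int)) (list_srl_rel_metadata : List String), Dom_compute_ent_relations list_srl2srl list_srl2ent list_srl_rel_metadata → Pre_compute_ent_relations list_srl2srl list_srl2ent list_srl_rel_metadata → Spec_compute_ent_relations list_srl2srl list_srl2ent list_srl_rel_metadata (compute_ent_relations list_srl2srl list_srl2ent list_srl_rel_metadata)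

-- ===== LEMMAS AND PROOFS =====

-- the entity list of a given srl id, as B computes it
def pvEnts (list_srl2ent : List (Int × Int)) (s : Int) : List Int :=
  (list_srl2ent.filter (fun p => p.1 == s)).map (·.2)

theorem pvEnts_eq_nil_iff (list_srl2ent : List (Int × Int)) (s : Int) :
    pvEnts list_srl2ent s = [] ↔ s ∉ list_srl2ent.map Prod.fst := by
  simp [pvEnts, List.filter_eq_nil_iff]
  aesop

-- A's if/contains/append dict-build step is exactly a `modify`
theorem pv_stepA_eq_modify (d : PySem.Dict Int (List Int)) (k v : Int) :
    (if d.contains k then d.modify k [] (fun l => l ++ [v]) else d.insert k [v])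
      = d.modify k [] (fun l => l ++ [v]) := by
  by_cases h : d.contains k = true
  · simp [h]
  · have hf : d.contains k = false := by simpa using h
    simp [h, PySem.Dict.modify, PySem.Dict.getD_of_not_contains d [] hf]

-- A's built dict looks up to exactly B's filtered entity list (none iff empty)
theorem pv_dict_get (list_srl2ent : List (Int × Int)) (s : Int) :
    (list_srl2ent.foldl (fun d p =>
        if d.contains p.1 then d.modify p.1 [] (fun l => l ++ [p.2])
        else d.insert p.1 [p.2]) PySem.Dict.empty).get? s
      = if pvEnts list_srl2ent s = [] then none else some (pvEnts list_srl2ent s) := by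
  have hstep : (fun (d : PySem.Dict Int (List Int)) (p : Int × Int) =>
      if d.contains p.1 then d.modify p.1 [] (fun l => l ++ [p.2]) else d.insert p.1 [p.2])
      = fun d p => d.modify p.1 [] (fun l => l ++ [p.2]) := by
    funext d p; exact pv_stepA_eq_modify d p.1 p.2
  rw [hstep]
  set F := list_srl2ent.foldl (fun d p => d.modify p.1 [] (fun l => l ++ [p.2]))
    PySem.Dict.empty with hF
  have hkeys : F.keys = PySem.Set.update (PySem.Dict.empty : PySem.Dict Int (List Int)).keys
      (list_srl2ent.map Prod.fst) :=
    PySem.Dict.keys_foldl_modify_key list_srl2ent Prod.fst [] (fun _ p l => l ++ [p.2])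
      PySem.Dict.empty
  have hgd : F.getD s [] = pvEnts list_srl2ent s := by
    have := PySem.Dict.getD_foldl_modify_append list_srl2ent
      (PySem.Dict.empty : PySem.Dict Int (List Int)) s
    simpa [pvEnts, PySem.Dict.getD_empty] using this
  have hmem : F.contains s = true ↔ s ∈ list_srl2ent.map Prod.fst := by
    rw [PySem.Dict.contains_iff_mem_keys, hkeys, PySem.Dict.keys_empty]
    have hupd : PySem.Set.update ([] : PySem.Set Int) (list_srl2ent.map Prod.fst)
        = PySem.Set.ofList (list_srl2ent.map Prod.fst) := by
      rw [PySem.Set.ofList_eq_foldl]; rfl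
    rw [hupd, PySem.Set.mem_ofList]
  by_cases hc : F.contains s = true
  · have hne : pvEnts list_srl2ent s ≠ [] := by
      rw [Ne, pvEnts_eq_nil_iff]; simpa using hmem.mp hc
    have hsome : (F.get? s).isSome := by
      rw [← PySem.Dict.contains_eq_isSome_get?]; exact hc
    obtain ⟨v, hv⟩ := Option.isSome_iff_exists.mp hsome
    rw [hv, if_neg hne, ← PySem.Dict.getD_of_get?_eq_some F [] hv, hgd]
  · have hnil : pvEnts list_srl2ent s = [] := by
      rw [pvEnts_eq_nil_iff]; intro hm; exact hc (hmem.mpr hm)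
    have hnone : F.get? s = none := by
      cases h : F.get? s with
      | none => rfl
      | some v =>
          exact absurd (by rw [PySem.Dict.contains_eq_isSome_get?, h]; rfl) hc
    rw [hnone, if_pos hnil]

-- the two inner append loops of A flattened
theorem pv_inner (l2 : List Int) (e1 : Int) (m : String)
    (acc : (List (Int × Int)) × List String) :
    l2.foldl (fun acc e2 => (acc.1 ++ [(e1, e2)], acc.2 ++ [m])) acc
      = (acc.1 ++ l2.map (fun e2 => (e1, e2)), acc.2 ++ List.replicate l2.length m) := by
  induction l2 generalizing acc with
  | nil => simp
  | cons x t ih => simp [ih, List.replicate_succ]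

theorem pv_outer (l1 l2 : List Int) (m : String)
    (acc : (List (Int × Int)) × List String) :
    l1.foldl (fun acc e1 =>
        l2.foldl (fun acc e2 => (acc.1 ++ [(e1, e2)], acc.2 ++ [m])) acc) acc
      = (acc.1 ++ l1.flatMap (fun e1 => l2.map (fun e2 => (e1, e2))),
         acc.2 ++ List.replicate (l1.length * l2.length) m) := by
  induction l1 generalizing acc with
  | nil => simp
  | cons x t ih =>
      have harith : (t.length + 1) * l2.length = l2.length + t.length * l2.length := by ring
      rw [List.foldl_cons, pv_inner, ih]
      simp only [List.flatMap_cons, List.length_cons, harith, List.replicate_add,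
        List.append_assoc]

-- ===== VERDICT (by name: the statement is the Claim_ definition above) =====
theorem compute_ent_relations_spec : Claim_equal_compute_ent_relations := by
  intro l2l l2e md _ _
  have key : ∀ (acc : (List (Int × Int)) × List String) (ip : Int × (Int × Int)),
      (match (l2e.foldl (fun d p =>
          if d.contains p.1 then d.modify p.1 [] (fun l => l ++ [p.2])
          else d.insert p.1 [p.2]) PySem.Dict.empty).get? ip.2.1 with
        | none => acc
        | some list_e1 =>
          match (l2e.foldl (fun d p =>
              if d.contains p.1 then d.modify p.1 [] (fun l => l ++ [p.2])
              else d.insert p.1 [p.2]) PySem.Dict.empty).get? ip.2.2 with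
          | none => acc
          | some list_e2 =>
            list_e1.foldl (fun acc e1 =>
              list_e2.foldl (fun acc e2 =>
                (acc.1 ++ [(e1, e2)], acc.2 ++ [(PySem.List.pyGet? md ip.1).getD ""])) acc) acc)
      = (let es1 := (l2e.filter (fun p => p.1 == ip.2.1)).map (·.2)
         let es2 := (l2e.filter (fun p => p.1 == ip.2.2)).map (·.2)
         let n := es1.length * es2.length
         if n ≠ 0 then
           (acc.1 ++ es1.flatMap (fun e1 => es2.map (fun e2 => (e1, e2))),
            acc.2 ++ List.replicate n ((PySem.List.pyGet? md ip.1).getD ""))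
         else acc) := by
    intro acc ip
    rw [pv_dict_get l2e ip.2.1, pv_dict_get l2e ip.2.2]
    by_cases h1 : pvEnts l2e ip.2.1 = []
    · simp only [pvEnts] at h1
      simp [pvEnts, h1]
    · by_cases h2 : pvEnts l2e ip.2.2 = []
      · simp only [pvEnts] at h2
        simp [pvEnts, h2]
        split <;> rfl
      · have hn1 : (l2e.filter (fun p => p.1 == ip.2.1)) ≠ [] := by
          intro h; exact h1 (by simp [pvEnts, h])
        have hn2 : (l2e.filter (fun p => p.1 == ip.2.2)) ≠ [] := by
          intro h; exact h2 (by simp [pvEnts, h])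
        simp only [pvEnts] at h1 h2
        simp [pvEnts, pv_outer, Function.comp_def, List.length_map, h1, h2, hn1, hn2,
          List.length_eq_zero_iff]
  show compute_ent_relations l2l l2e md = compute_ent_relations_alt l2l l2e md
  exact List.foldl_ext _ _ _ (fun acc ip _ => key acc ip)
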